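-- pv_equiv track=rewrite | github.com/Thankyou-Cheems/FIUP | fiup.py | convert_spaces_to_indent
-- ===== SOURCE A (Python) =====
-- INDENT_CHAR = '→'
--
-- def convert_spaces_to_indent(text: str, indent_unit: str = '    ') -> str:
--     """将实际缩进转换为 → （用于显示）"""
--     if not text:
--         return text
--     lines = []
--     for line in text.split('\n'):
--         indent_count = 0
--         pos = 0
--         # 检测空格缩进
--         while pos < len(line):
--             if line[pos:pos + len(indent_unit)] == indent_unit:
--                 indent_count += 1
--                 pos += len(indent_unit)
--             elif line[pos] == '\t':
--                 indent_count += 1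
--                 pos += 1
--             else:
--                 break
--         lines.append(INDENT_CHAR * indent_count + line[pos:])
--     return '\n'.join(lines)
-- ===== SOURCE B (Python) =====
-- INDENT_CHAR = '→'
--
-- def _mark_indent(line, indent_unit):
--     """Consume the leading indent tokens off the front of the line, growing the arrow prefix."""
--     arrows = ''
--     rest = line
--     while True:
--         if indent_unit and rest.startswith(indent_unit):
--             rest = rest[len(indent_unit):]
--         elif rest.startswith('\t'):
--             rest = rest[1:]
--         else:
--             return arrows + rest
--         arrows += INDENT_CHAR
--
-- def convert_spaces_to_indent(text, indent_unit='    '):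
--     if not text:
--         return text
--     return '\n'.join(_mark_indent(line, indent_unit) for line in text.split('\n'))
-- ===== Notes on version B (the rewrite author's own statement) =====
-- stated objective: simpler
-- what changed: Replaces A's index-arithmetic scan (pos pointer plus indent counter, slice comparisons, then '→'*count + line[pos:]) with a per-line helper that consumes recognised indent tokens off the front via startswith/slicing while growing the arrow prefix, joined over a generator; B also terminates on an empty indent_unit where A loops forever (excluded by Pre_).
import Mathlib
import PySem

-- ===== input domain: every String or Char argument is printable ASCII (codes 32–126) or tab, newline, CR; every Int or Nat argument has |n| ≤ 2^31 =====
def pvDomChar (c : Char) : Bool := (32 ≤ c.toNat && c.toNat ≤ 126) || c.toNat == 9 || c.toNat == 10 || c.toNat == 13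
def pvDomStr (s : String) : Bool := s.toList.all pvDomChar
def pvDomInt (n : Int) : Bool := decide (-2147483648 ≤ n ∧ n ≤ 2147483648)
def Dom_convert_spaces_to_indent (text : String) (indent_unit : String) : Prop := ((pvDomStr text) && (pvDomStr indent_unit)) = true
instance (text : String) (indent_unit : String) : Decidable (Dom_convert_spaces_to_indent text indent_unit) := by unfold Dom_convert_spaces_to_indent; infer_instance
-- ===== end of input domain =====

-- B is a simpler decomposition of the same task: a per-line helper that consumes recognised
-- indent tokens off the front of the line with startswith/slicing while growing the arrow
-- prefix, instead of A's index arithmetic with a separate counter; B also terminates on an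
-- empty indent_unit, where A's loop does not (those inputs are outside Pre_).

-- ===== PORT A =====
def pvIndentChar : Char := '→'   -- module constant INDENT_CHAR

-- A's inner while loop over (indent_count, pos); fuel bounds the iterations: inside Pre_ each
-- iteration advances pos by at least 1, so fuel (line.length + 1) is never exhausted where the
-- Python loop terminates (the fuel-out value is reached only where Python diverges).
def pvScanA (line unit : List Char) : Nat → Nat → Nat → Nat × Nat
  | 0, indent_count, pos => (indent_count, pos)
  | fuel+1, indent_count, pos =>
    if pos < line.length then
      -- line[pos:pos+len(indent_unit)] == indent_unit (slice with nonneg bounds = drop/take)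
      if (line.drop pos).take unit.length = unit then
        pvScanA line unit fuel (indent_count + 1) (pos + unit.length)
      else if getElem? line pos = some '\t' then       -- line[pos] == '\t' (pos in range here)
        pvScanA line unit fuel (indent_count + 1) (pos + 1)
      else (indent_count, pos)
    else (indent_count, pos)

-- one iteration of A's 'for line in ...': lines.append('→' * indent_count + line[pos:])
def pvLineA (unit line : List Char) : List Char :=
  let cp := pvScanA line unit (line.length + 1) 0 0
  List.replicate cp.1 pvIndentChar ++ line.drop cp.2

def convert_spaces_to_indent (text : String) (indent_unit : String) : String :=
  if text = "" then text
  else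
    String.ofList (PySem.Chars.join ['\n']
      ((PySem.Chars.splitOn text.toList ['\n']).map (pvLineA indent_unit.toList)))

-- ===== PORT B =====
-- B's per-line while loop: rest is the unconsumed suffix, arrows the accumulated prefix.
-- Fuel: a nonempty token is consumed each iteration, so rest.length + 1 is never exhausted.
def pvMarkB (unit : List Char) : Nat → List Char → List Char → List Char
  | 0, rest, arrows => arrows ++ rest
  | fuel+1, rest, arrows =>
    if unit ≠ [] ∧ unit.isPrefixOf rest then           -- indent_unit and rest.startswith(indent_unit)
      pvMarkB unit fuel (rest.drop unit.length) (arrows ++ [pvIndentChar])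
    else if ['\t'].isPrefixOf rest then                -- rest.startswith('\t')
      pvMarkB unit fuel (rest.drop 1) (arrows ++ [pvIndentChar])
    else arrows ++ rest

def pvLineB (unit line : List Char) : List Char :=     -- _mark_indent(line, indent_unit)
  pvMarkB unit (line.length + 1) line []

def convert_spaces_to_indent_alt (text : String) (indent_unit : String) : String :=
  if text = "" then text
  else
    String.ofList (PySem.Chars.join ['\n']
      ((PySem.Chars.splitOn text.toList ['\n']).map (pvLineB indent_unit.toList)))

-- ===== PRECONDITION & SPEC =====
-- Pre_ excludes only inputs where A never returns: an empty indent_unit together with a text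
-- containing any non-newline character makes A's loop match the empty unit without advancing
-- pos, an infinite loop (with an all-newline text every line is empty and A still returns).
def Pre_convert_spaces_to_indent (text : String) (indent_unit : String) : Prop :=
  indent_unit ≠ "" ∨ text.toList.all (· = '\n')
instance (text : String) (indent_unit : String) : Decidable (Pre_convert_spaces_to_indent text indent_unit) := by
  unfold Pre_convert_spaces_to_indent; infer_instance

def pvWitness_convert_spaces_to_indent : String × String := ("    x\n\t\ty", "    ")

def Spec_convert_spaces_to_indent (text : String) (indent_unit : String) (out : String) : Prop := out = convert_spaces_to_indent_alt text indent_unit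
instance (text : String) (indent_unit : String) (out : String) : Decidable (Spec_convert_spaces_to_indent text indent_unit out) := by unfold Spec_convert_spaces_to_indent; infer_instance

-- ===== CLAIM (what is proved, stated in full; the proofs are below) =====
def Claim_equal_convert_spaces_to_indent : Prop := ∀ (text : String) (indent_unit : String), Dom_convert_spaces_to_indent text indent_unit → Pre_convert_spaces_to_indent text indent_unit → Spec_convert_spaces_to_indent text indent_unit (convert_spaces_to_indent text indent_unit)

-- ===== LEMMAS AND PROOFS =====

-- Core loop correspondence: with a nonempty unit, B's suffix-consuming loop on line.drop pos
-- with arrows = replicate count '→' produces exactly A's '→' * count ++ line[pos:].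
lemma pvMark_eq_scan (line unit : List Char) (h : unit ≠ []) :
    ∀ fuel pos count,
      pvMarkB unit fuel (line.drop pos) (List.replicate count pvIndentChar) =
        List.replicate (pvScanA line unit fuel count pos).1 pvIndentChar ++
          line.drop (pvScanA line unit fuel count pos).2 := by
  intro fuel
  induction fuel with
  | zero => intro pos count; simp [pvMarkB, pvScanA]
  | succ fuel ih =>
    intro pos count
    by_cases hp : pos < line.length
    · by_cases h1 : (line.drop pos).take unit.length = unit
      · have hpre : unit.isPrefixOf (line.drop pos) = true := by
          rw [List.isPrefixOf_iff_prefix, List.prefix_iff_eq_take]; exact h1.symm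
        rw [pvMarkB, if_pos ⟨h, hpre⟩, pvScanA, if_pos hp, if_pos h1]
        rw [List.drop_drop, ← List.replicate_succ']
        exact ih (pos + unit.length) (count + 1)
      · have hnpre : ¬ (unit ≠ [] ∧ unit.isPrefixOf (line.drop pos) = true) := by
          rintro ⟨-, hpre⟩
          exact h1 ((List.prefix_iff_eq_take.mp (List.isPrefixOf_iff_prefix.mp hpre)).symm)
        by_cases h2 : getElem? line pos = some '\t'
        · have htab : (['\t'] : List Char).isPrefixOf (line.drop pos) = true := by
            rw [List.isPrefixOf_iff_prefix]
            cases hd : line.drop pos with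
            | nil =>
              have h3 : (List.drop pos line).head? = getElem? line pos := List.head?_drop
              rw [hd, h2] at h3; simp at h3
            | cons c cs =>
              have h3 : (List.drop pos line).head? = getElem? line pos := List.head?_drop
              rw [hd, h2] at h3
              exact ⟨cs, by rw [Option.some_inj.mp h3]; rfl⟩
          rw [pvMarkB, if_neg hnpre, if_pos htab, pvScanA, if_pos hp, if_neg h1, if_pos h2]
          rw [List.drop_drop, ← List.replicate_succ']
          exact ih (pos + 1) (count + 1)
        · have hntab : ¬ (['\t'] : List Char).isPrefixOf (line.drop pos) = true := by
            intro htab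
            rcases List.isPrefixOf_iff_prefix.mp htab with ⟨t, ht⟩
            apply h2
            rw [← List.head?_drop, ← ht]; rfl
          rw [pvMarkB, if_neg hnpre, if_neg hntab, pvScanA, if_pos hp, if_neg h1, if_neg h2]
    · have hd : line.drop pos = [] := List.drop_eq_nil_of_le (by omega)
      have hnpre : ¬ (unit ≠ [] ∧ unit.isPrefixOf (line.drop pos) = true) := by
        rintro ⟨-, hpre⟩
        rcases List.isPrefixOf_iff_prefix.mp hpre with ⟨t, ht⟩
        rw [hd] at ht
        exact h (by simpa using (List.append_eq_nil_iff.mp ht).1)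
      have hntab : ¬ (['\t'] : List Char).isPrefixOf (line.drop pos) = true := by
        rw [hd]; simp [List.isPrefixOf]
      rw [pvMarkB, if_neg hnpre, if_neg hntab, pvScanA, if_neg hp]

-- splitOn.go over an all-newline input with empty pieces accumulated yields only empty pieces.
lemma pvSplit_go_all_nil :
    ∀ (fuel : Nat) (l : List Char) (acc : List (List Char)),
      (∀ x ∈ acc, x = ([] : List Char)) → (∀ c ∈ l, c = '\n') → l.length < fuel →
      ∀ r ∈ PySem.Chars.splitOn.go ['\n'] fuel l [] acc, r = [] := by
  intro fuel
  induction fuel with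
  | zero => intro l acc _ _ hlt; omega
  | succ fuel ih =>
    intro l acc hacc hl hlt r hr
    cases l with
    | nil =>
      simp [PySem.Chars.splitOn.go] at hr
      rcases hr with h | h
      · exact hacc _ h
      · exact h
    | cons c rest =>
      have hc : c = '\n' := hl c (by simp)
      subst hc
      have hpre : (['\n'] : List Char).isPrefixOf ('\n' :: rest) = true := by
        simp [List.isPrefixOf]
      rw [PySem.Chars.splitOn.go] at hr
      rw [if_pos hpre] at hr
      refine ih rest ([] :: acc) ?_ (fun c hc => hl c (by simp [hc])) (by simp at hlt ⊢; omega) r (by simpa using hr)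
      intro x hx
      simp at hx
      rcases hx with h | h
      · exact h
      · exact hacc x h

lemma pvSplitOn_all_nil (cs : List Char) (h : ∀ c ∈ cs, c = '\n') :
    ∀ r ∈ PySem.Chars.splitOn cs ['\n'], r = [] := by
  intro r hr
  exact pvSplit_go_all_nil (cs.length + 1) cs [] (by simp) h (by omega) r hr

-- ===== VERDICT (by name: the statement is the Claim_ definition above) =====
theorem convert_spaces_to_indent_spec : Claim_equal_convert_spaces_to_indent := by
  intro text indent_unit _ hpre
  unfold Spec_convert_spaces_to_indent convert_spaces_to_indent convert_spaces_to_indent_alt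
  by_cases ht : text = ""
  · simp [ht]
  · rw [if_neg ht, if_neg ht]
    apply congrArg (fun l => String.ofList (PySem.Chars.join ['\n'] l))
    apply List.map_congr_left
    intro line hline
    rcases hpre with hu | hnl
    · -- nonempty unit: per-line correspondence
      have hu' : indent_unit.toList ≠ [] := fun hn => hu (String.toList_eq_nil_iff.mp hn)
      have := pvMark_eq_scan line indent_unit.toList hu' (line.length + 1) 0 0
      simp only [List.drop_zero, List.replicate_zero] at this
      simp only [pvLineA, pvLineB]
      exact this.symm
    · -- all-newline text: every line is empty and both sides map it to []
      have hnil : line = [] :=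
        pvSplitOn_all_nil text.toList (by simpa [List.all_eq_true] using hnl) line hline
      subst hnil
      simp [pvLineA, pvLineB, pvScanA, pvMarkB, List.isPrefixOf]
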